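-- pv_equiv track=rewrite | github.com/russellmiller49/proc_suite_deploy | app/registry/processing/masking.py | _is_non_procedural_heading
-- ===== SOURCE A (Python) =====
-- NON_PROCEDURAL_HEADINGS: tuple[str, ...] = (
--     "INDICATION",
--     "INDICATIONS",
--     "HISTORY",
--     "CONSENT",
--     "PLAN",
--     "IMPRESSION/PLAN",
--     "IMPRESSION / PLAN",
--     "ASSESSMENT/PLAN",
--     "ASSESSMENT / PLAN",
--     "RECOMMENDATION",
--     "RECOMMENDATIONS",
--     "ASSESSMENT",
-- )
--
-- def _is_non_procedural_heading(header: str) -> bool: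
--     if header in NON_PROCEDURAL_HEADINGS:
--         return True
--     return any(
--         header.startswith(prefix)
--         for token in NON_PROCEDURAL_HEADINGS
--         for prefix in (f"{token} ", f"{token}/", f"{token} -")
--     )
-- ===== SOURCE B (Python) =====
-- NON_PROCEDURAL_HEADINGS: tuple[str, ...] = (
--     "INDICATION",
--     "INDICATIONS",
--     "HISTORY",
--     "CONSENT",
--     "PLAN",
--     "IMPRESSION/PLAN",
--     "IMPRESSION / PLAN",
--     "ASSESSMENT/PLAN",
--     "ASSESSMENT / PLAN",
--     "RECOMMENDATION",
--     "RECOMMENDATIONS",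
--     "ASSESSMENT",
-- )
--
-- def _is_non_procedural_heading(header: str) -> bool:
--     # Subset simulation (Aho-Corasick style): one left-to-right pass over the
--     # header, maintaining the set of heading suffixes still compatible with
--     # the characters consumed so far.  A match fires when the empty suffix is
--     # active (a whole heading has just been read) and the next character is a
--     # boundary (' ' or '/', the ' -' separator being subsumed by ' '), or at
--     # end of input.  No startswith / prefix strings at all.
--     active = list(NON_PROCEDURAL_HEADINGS)
--     for ch in header:
--         if "" in active and ch in " /":
--             return True
--         active = [s[1:] for s in active if s and s[0] == ch]
--         if not active:
--             return False
--     return "" in active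
-- ===== Notes on version B (the rewrite author's own statement) =====
-- stated objective: alternative
-- what changed: A scans the heading tuple testing exact membership plus 36 generated prefix strings with startswith; B instead makes a single left-to-right pass over the header itself, maintaining the set of still-compatible heading suffixes (Aho-Corasick-style subset simulation) and firing when the empty suffix is active at a boundary character or at end of input.
import Mathlib
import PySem

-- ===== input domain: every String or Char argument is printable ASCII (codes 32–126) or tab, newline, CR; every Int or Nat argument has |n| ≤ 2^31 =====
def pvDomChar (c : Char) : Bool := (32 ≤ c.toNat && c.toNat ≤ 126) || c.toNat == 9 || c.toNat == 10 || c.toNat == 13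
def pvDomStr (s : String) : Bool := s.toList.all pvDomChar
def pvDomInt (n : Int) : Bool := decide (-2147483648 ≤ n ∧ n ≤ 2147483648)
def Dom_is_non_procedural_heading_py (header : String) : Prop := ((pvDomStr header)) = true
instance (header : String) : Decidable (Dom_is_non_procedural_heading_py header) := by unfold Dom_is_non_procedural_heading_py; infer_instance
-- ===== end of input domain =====

-- B replaces A's membership test plus 36 generated prefix strings by a single pass over the
-- header maintaining the set of still-compatible heading suffixes (alternative algorithm).


-- module constant NON_PROCEDURAL_HEADINGS (shared by both Python files)
def pvHeadings : List String :=
  ["INDICATION", "INDICATIONS", "HISTORY", "CONSENT", "PLAN",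
   "IMPRESSION/PLAN", "IMPRESSION / PLAN", "ASSESSMENT/PLAN", "ASSESSMENT / PLAN",
   "RECOMMENDATION", "RECOMMENDATIONS", "ASSESSMENT"]

-- ===== PORT A =====
def is_non_procedural_heading_py (header : String) : Bool :=
  if pvHeadings.contains header then true
  else (pvHeadings.flatMap (fun token => [token ++ " ", token ++ "/", token ++ " -"])).any
         (fun prefix_ => PySem.Str.startswith header prefix_)

-- ===== PORT B =====
-- the loop body of Source B: recursion over the header's characters, state = active suffix list
def pvWalk (active : List (List Char)) (chars : List Char) : Bool :=
  match chars with
  | [] => active.contains ([] : List Char)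
  | ch :: rest =>
    if active.contains ([] : List Char) && (ch == ' ' || ch == '/') then true
    else
      -- active = [s[1:] for s in active if s and s[0] == ch]
      let active' := (active.filter (fun s => match s with
                        | [] => false
                        | d :: _ => d == ch)).map List.tail
      if active'.isEmpty then false else pvWalk active' rest

def is_non_procedural_heading_py_alt (header : String) : Bool :=
  pvWalk (pvHeadings.map String.toList) header.toList

-- ===== PRECONDITION & SPEC =====
def Spec_is_non_procedural_heading_py (header : String) (out : Bool) : Prop := out = is_non_procedural_heading_py_alt header
instance (header : String) (out : Bool) : Decidable (Spec_is_non_procedural_heading_py header out) := by unfold Spec_is_non_procedural_heading_py; infer_instance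

-- ===== CLAIM (what is proved, stated in full; the proofs are below) =====
def Claim_equal_is_non_procedural_heading_py : Prop := ∀ (header : String), Dom_is_non_procedural_heading_py header → Spec_is_non_procedural_heading_py header (is_non_procedural_heading_py header)

-- ===== LEMMAS AND PROOFS =====

-- the common per-token test: t is a prefix of s whose boundary is end-of-string, ' ' or '/'
def pvGood (t s : List Char) : Bool :=
  decide (t <+: s) &&
    (s.length == t.length || ((s[t.length]?).any (fun c => c == ' ' || c == '/')))

-- a prefix extended by one character: l ++ [c] is a prefix of s iff l is and the next char is c
theorem pv_pref_snoc (l : List Char) (c : Char) (s : List Char) :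
    (l ++ [c]) <+: s ↔ l <+: s ∧ s[l.length]? = some c := by
  induction l generalizing s with
  | nil =>
      cases s with
      | nil => simp
      | cons a s => simp [List.cons_prefix_cons, eq_comm]
  | cons a l ih =>
      cases s with
      | nil => simp
      | cons b s => simp [List.cons_prefix_cons, ih, and_assoc]

-- per-token equivalence of A's four-way test and the common boundary test
theorem pv_token_iff (t s : List Char) :
    (s = t ∨ (t ++ [' ']) <+: s ∨ (t ++ ['/']) <+: s ∨ (t ++ [' ', '-']) <+: s) ↔
    pvGood t s = true := by
  unfold pvGood
  simp only [Bool.and_eq_true, decide_eq_true_eq, Bool.or_eq_true, beq_iff_eq,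
    Option.any_eq_true]
  constructor
  · rintro (rfl | h | h | h)
    · exact ⟨List.prefix_refl _, Or.inl rfl⟩
    · rcases (pv_pref_snoc t ' ' s).mp h with ⟨h1, h2⟩
      exact ⟨h1, Or.inr ⟨' ', h2, Or.inl rfl⟩⟩
    · rcases (pv_pref_snoc t '/' s).mp h with ⟨h1, h2⟩
      exact ⟨h1, Or.inr ⟨'/', h2, Or.inr rfl⟩⟩
    · have h' : (t ++ [' ']) <+: s :=
        List.IsPrefix.trans (by simp) h
      rcases (pv_pref_snoc t ' ' s).mp h' with ⟨h1, h2⟩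
      exact ⟨h1, Or.inr ⟨' ', h2, Or.inl rfl⟩⟩
  · rintro ⟨h1, (hlen | ⟨c, hc, (rfl | rfl)⟩)⟩
    · exact Or.inl ((List.IsPrefix.eq_of_length h1 hlen.symm).symm)
    · exact Or.inr (Or.inl ((pv_pref_snoc t ' ' s).mpr ⟨h1, hc⟩))
    · exact Or.inr (Or.inr (Or.inl ((pv_pref_snoc t '/' s).mpr ⟨h1, hc⟩)))

-- loop invariant of B: the walk succeeds iff some active suffix passes the boundary test
theorem pv_walk_eq (chars : List Char) :
    ∀ (T : List (List Char)), pvWalk T chars = T.any (fun t => pvGood t chars) := by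
  induction chars with
  | nil =>
      intro T
      simp only [pvWalk, pvGood]
      rw [Bool.eq_iff_iff]
      simp only [List.contains_iff_mem, List.any_eq_true, Bool.and_eq_true,
        decide_eq_true_eq]
      constructor
      · intro h; exact ⟨[], h, List.nil_prefix, by simp⟩
      · rintro ⟨t, ht, hpre, _⟩
        have : t = [] := List.prefix_nil.mp hpre
        subst this; exact ht
  | cons c rest ih =>
      intro T
      simp only [pvWalk]
      by_cases hfire : (T.contains ([] : List Char) && (c == ' ' || c == '/')) = true
      · rw [if_pos hfire]
        simp only [Bool.and_eq_true, List.contains_iff_mem, Bool.or_eq_true,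
          beq_iff_eq] at hfire
        rw [Eq.comm, List.any_eq_true]
        refine ⟨[], hfire.1, ?_⟩
        unfold pvGood
        rcases hfire.2 with rfl | rfl <;> simp
      · rw [if_neg hfire]
        have hstep :
            (((T.filter (fun s => match s with | [] => false | d :: _ => d == c)).map
                List.tail).any (fun t => pvGood t rest)) =
            T.any (fun t => pvGood t (c :: rest)) := by
          rw [Bool.eq_iff_iff]
          simp only [List.any_eq_true, List.mem_map, List.mem_filter]
          constructor
          · rintro ⟨u, ⟨s, ⟨hs, hcond⟩, rfl⟩, hg⟩
            cases s with
            | nil => simp at hcond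
            | cons d ds =>
                have hd : d = c := by simpa using hcond
                subst hd
                refine ⟨d :: ds, hs, ?_⟩
                unfold pvGood at hg ⊢
                simp only [Bool.and_eq_true, decide_eq_true_eq] at hg ⊢
                rcases hg with ⟨hp, hb⟩
                exact ⟨List.cons_prefix_cons.mpr ⟨rfl, by simpa using hp⟩, by simpa using hb⟩
          · rintro ⟨t, ht, hg⟩
            cases t with
            | nil =>
                exfalso
                unfold pvGood at hg
                simp only [Bool.and_eq_true, decide_eq_true_eq, List.length_nil,
                  Bool.or_eq_true, beq_iff_eq, Option.any_eq_true] at hg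
                rcases hg.2 with h0 | ⟨ch, hch, hcs⟩
                · simp at h0
                · simp only [List.getElem?_cons_zero, Option.some.injEq] at hch
                  subst hch
                  apply hfire
                  simp only [Bool.and_eq_true, List.contains_iff_mem, Bool.or_eq_true,
                    beq_iff_eq]
                  exact ⟨ht, hcs⟩
            | cons d ds =>
                unfold pvGood at hg
                simp only [Bool.and_eq_true, decide_eq_true_eq] at hg
                rcases hg with ⟨hp, hb⟩
                rcases List.cons_prefix_cons.mp hp with ⟨rfl, hp'⟩
                refine ⟨ds, ⟨d :: ds, ⟨ht, by simp⟩, rfl⟩, ?_⟩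
                unfold pvGood
                simp only [Bool.and_eq_true, decide_eq_true_eq]
                exact ⟨hp', by simpa using hb⟩
        by_cases hemp : ((T.filter (fun s => match s with | [] => false | d :: _ => d == c)).map
            List.tail).isEmpty = true
        · simp only [hemp, if_pos]
          rw [← hstep]
          rw [List.isEmpty_iff] at hemp
          rw [hemp]
          simp
        · simp only [Bool.not_eq_true] at hemp
          simp only [hemp, Bool.false_eq_true, if_false]
          rw [ih, hstep]

-- ===== VERDICT (by name: the statement is the Claim_ definition above) =====
theorem is_non_procedural_heading_py_spec : Claim_equal_is_non_procedural_heading_py := by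
  intro header _
  unfold Spec_is_non_procedural_heading_py is_non_procedural_heading_py is_non_procedural_heading_py_alt
  rw [pv_walk_eq, List.any_map]
  rw [Bool.eq_iff_iff]
  constructor
  · intro h
    rw [List.any_eq_true]
    by_cases hc : List.contains pvHeadings header = true
    · rcases (List.contains_iff_mem).mp hc with ht
      refine ⟨header, ht, ?_⟩
      exact (pv_token_iff _ _).mp (Or.inl rfl)
    · rw [if_neg hc] at h
      rw [List.any_eq_true] at h
      rcases h with ⟨p, hp, hsw⟩
      rw [List.mem_flatMap] at hp
      rcases hp with ⟨t, ht, hpt⟩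
      refine ⟨t, ht, ?_⟩
      have hsw' : p.toList <+: header.toList := by
        rw [PySem.Str.startswith_eq, PySem.Chars.startswith_iff] at hsw
        exact hsw
      apply (pv_token_iff t.toList header.toList).mp
      simp only [List.mem_cons, List.not_mem_nil, or_false] at hpt
      rcases hpt with rfl | rfl | rfl
      · right; left; simpa [String.toList_append] using hsw'
      · right; right; left; simpa [String.toList_append] using hsw'
      · right; right; right; simpa [String.toList_append] using hsw'
  · intro h
    rw [List.any_eq_true] at h
    rcases h with ⟨t, ht, htok⟩
    have hdisj := (pv_token_iff t.toList header.toList).mpr htok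
    have hsp' : (t.toList ++ [' ', '-'] <+: header.toList) → (t.toList ++ [' '] <+: header.toList) :=
      fun hd => List.IsPrefix.trans (by simp) hd
    rcases hdisj with heq | hsp | hsl | hd
    · have : header = t := String.toList_injective heq
      subst this
      rw [if_pos (List.contains_iff_mem.mpr ht)]
    · by_cases hc : List.contains pvHeadings header = true
      · rw [if_pos hc]
      · rw [if_neg hc, List.any_eq_true]
        refine ⟨t ++ " ", List.mem_flatMap.mpr ⟨t, ht, by simp⟩, ?_⟩
        rw [PySem.Str.startswith_eq, PySem.Chars.startswith_iff]
        simpa [String.toList_append] using hsp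
    · by_cases hc : List.contains pvHeadings header = true
      · rw [if_pos hc]
      · rw [if_neg hc, List.any_eq_true]
        refine ⟨t ++ "/", List.mem_flatMap.mpr ⟨t, ht, by simp⟩, ?_⟩
        rw [PySem.Str.startswith_eq, PySem.Chars.startswith_iff]
        simpa [String.toList_append] using hsl
    · by_cases hc : List.contains pvHeadings header = true
      · rw [if_pos hc]
      · rw [if_neg hc, List.any_eq_true]
        refine ⟨t ++ " ", List.mem_flatMap.mpr ⟨t, ht, by simp⟩, ?_⟩
        rw [PySem.Str.startswith_eq, PySem.Chars.startswith_iff]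
        simpa [String.toList_append] using hsp' hd
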